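-- pv_equiv track=rewrite | github.com/kbtlr/Gym-analytics-app | app/stats.py | _infer_big_three_bucket
-- ===== SOURCE A (Python) =====
-- BIG_THREE_ALIASES = {
--     "squat": {
--         "squat", "back squat", "front squat", "pause squat",
--         "high bar squat", "low bar squat", "safety bar squat",
--     },
--     "bench": {
--         "bench", "bench press", "paused bench", "close grip bench",
--         "incline bench", "flat bench",
--     },
--     "deadlift": {
--         "deadlift", "conventional deadlift", "sumo deadlift",
--         "paused deadlift", "romanian deadlift", "rdl", "trap bar deadlift",
--     },
-- }
--
-- def _normalize_name(value):
--     return (value or "").strip().lower()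
--
-- def _infer_big_three_bucket(exercise_name, movement_category=None):
--     normalized_name = _normalize_name(exercise_name)
--     normalized_category = _normalize_name(movement_category)
--
--     if normalized_category in {"squat", "bench", "deadlift"}:
--         return normalized_category
--
--     for bucket, aliases in BIG_THREE_ALIASES.items():
--         if normalized_name in aliases:
--             return bucket
--         if bucket in normalized_name:
--             return bucket
--
--     return None
-- ===== SOURCE B (Python) =====
-- BIG_THREE_ALIASES = {
--     "squat": {
--         "squat", "back squat", "front squat", "pause squat",
--         "high bar squat", "low bar squat", "safety bar squat",
--     },
--     "bench": {
--         "bench", "bench press", "paused bench", "close grip bench",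
--         "incline bench", "flat bench",
--     },
--     "deadlift": {
--         "deadlift", "conventional deadlift", "sumo deadlift",
--         "paused deadlift", "romanian deadlift", "rdl", "trap bar deadlift",
--     },
-- }
--
-- _BUCKETS = ("squat", "bench", "deadlift")
--
-- # Flat reverse index built once: alias -> bucket (all aliases are distinct).
-- _ALIAS_TO_BUCKET = {
--     alias: bucket
--     for bucket, aliases in BIG_THREE_ALIASES.items()
--     for alias in aliases
-- }
--
--
-- def _infer_big_three_bucket(exercise_name, movement_category=None):
--     name = (exercise_name or "").strip().lower()
--     category = (movement_category or "").strip().lower()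
--
--     if category in _BUCKETS:
--         return category
--
--     # Phase 1: exact match via the reverse index (single lookup).
--     bucket = _ALIAS_TO_BUCKET.get(name)
--     if bucket is not None:
--         return bucket
--
--     # Phase 2: substring fallback over the three bucket names in order.
--     for b in _BUCKETS:
--         if b in name:
--             return b
--
--     return None
-- ===== Notes on version B (the rewrite author's own statement) =====
-- stated objective: idiomatic
-- what changed: Replaces A's single interleaved loop (exact set-membership + substring test per bucket) with a flat alias->bucket reverse index queried once for the exact phase, followed by a separate substring-fallback loop over the three bucket names.
import Mathlib
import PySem

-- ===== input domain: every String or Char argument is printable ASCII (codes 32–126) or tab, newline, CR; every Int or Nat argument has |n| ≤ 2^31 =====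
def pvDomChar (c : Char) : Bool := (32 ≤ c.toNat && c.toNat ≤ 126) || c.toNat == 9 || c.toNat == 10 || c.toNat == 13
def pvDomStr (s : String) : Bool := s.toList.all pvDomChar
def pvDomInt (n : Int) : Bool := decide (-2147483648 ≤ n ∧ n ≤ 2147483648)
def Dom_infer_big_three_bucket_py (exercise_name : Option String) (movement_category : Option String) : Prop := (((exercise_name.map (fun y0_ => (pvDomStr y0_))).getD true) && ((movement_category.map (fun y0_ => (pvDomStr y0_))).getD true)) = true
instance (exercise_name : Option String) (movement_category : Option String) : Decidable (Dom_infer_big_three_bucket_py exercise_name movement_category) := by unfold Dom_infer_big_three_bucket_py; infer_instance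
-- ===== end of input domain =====

-- B replaces A's interleaved exact+substring loop by a flat alias->bucket reverse index
-- queried once, followed by a separate substring-fallback loop (idiomatic; not faster).

-- ===== PORT A =====
-- _normalize_name(value) = (value or "").strip().lower()
def pvNormName (value : Option String) : String :=
  PySem.Str.lower (PySem.Str.strip (value.getD ""))

-- BIG_THREE_ALIASES (dict in insertion order; each value a set of distinct strings)
def pvBigThreeAliases : List (String × PySem.Set String) :=
  [ ("squat", PySem.Set.ofList ["squat", "back squat", "front squat", "pause squat",
      "high bar squat", "low bar squat", "safety bar squat"]),
    ("bench", PySem.Set.ofList ["bench", "bench press", "paused bench", "close grip bench",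
      "incline bench", "flat bench"]),
    ("deadlift", PySem.Set.ofList ["deadlift", "conventional deadlift", "sumo deadlift",
      "paused deadlift", "romanian deadlift", "rdl", "trap bar deadlift"]) ]

-- the for-loop of A: first exact set membership, then substring test, per bucket
def pvLoopA : List (String × PySem.Set String) → String → Option String
  | [], _ => none
  | (bucket, aliases) :: rest, n =>
      if PySem.Set.contains aliases n then some bucket
      else if PySem.Str.isIn bucket n then some bucket
      else pvLoopA rest n

def infer_big_three_bucket_py (exercise_name : Option String) (movement_category : Option String) : Option String :=
  let normalized_name := pvNormName exercise_name
  let normalized_category := pvNormName movement_category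
  if PySem.Set.contains (PySem.Set.ofList ["squat", "bench", "deadlift"]) normalized_category then
    some normalized_category
  else pvLoopA pvBigThreeAliases normalized_name

-- ===== PORT B =====
def pvBucketsB : List String := ["squat", "bench", "deadlift"]

-- the reverse index, built once by the dict comprehension of Source B (all aliases distinct)
def pvAliasToBucket : PySem.Dict String String :=
  pvBigThreeAliases.foldl
    (fun d p => p.2.foldl (fun d a => d.insert a p.1) d) PySem.Dict.empty

-- phase-2 fallback loop of Source B: substring test only, over the three bucket names
def pvSubLoopB : List String → String → Option String
  | [], _ => none
  | b :: rest, n => if PySem.Str.isIn b n then some b else pvSubLoopB rest n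

-- phases 1+2 of Source B: exact reverse-index lookup, else the substring fallback loop
def pvLookupB (n : String) : Option String :=
  match pvAliasToBucket.get? n with
  | some bucket => some bucket
  | none => pvSubLoopB pvBucketsB n

def infer_big_three_bucket_py_alt (exercise_name : Option String) (movement_category : Option String) : Option String :=
  let name := PySem.Str.lower (PySem.Str.strip (exercise_name.getD ""))
  let category := PySem.Str.lower (PySem.Str.strip (movement_category.getD ""))
  if pvBucketsB.contains category then some category
  else pvLookupB name

-- ===== PRECONDITION & SPEC =====
def Spec_infer_big_three_bucket_py (exercise_name : Option String) (movement_category : Option String) (out : Option String) : Prop := out = infer_big_three_bucket_py_alt exercise_name movement_category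
instance (exercise_name : Option String) (movement_category : Option String) (out : Option String) : Decidable (Spec_infer_big_three_bucket_py exercise_name movement_category out) := by unfold Spec_infer_big_three_bucket_py; infer_instance

-- ===== CLAIM (what is proved, stated in full; the proofs are below) =====
def Claim_equal_infer_big_three_bucket_py : Prop := ∀ (exercise_name : Option String) (movement_category : Option String), Dom_infer_big_three_bucket_py exercise_name movement_category → Spec_infer_big_three_bucket_py exercise_name movement_category (infer_big_three_bucket_py exercise_name movement_category)

-- ===== LEMMAS AND PROOFS =====

-- the fully evaluated reverse index
theorem pvAliasToBucket_eq : pvAliasToBucket = PySem.Dict.mk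
    [ ("squat", "squat"), ("back squat", "squat"), ("front squat", "squat"),
      ("pause squat", "squat"), ("high bar squat", "squat"), ("low bar squat", "squat"),
      ("safety bar squat", "squat"),
      ("bench", "bench"), ("bench press", "bench"), ("paused bench", "bench"),
      ("close grip bench", "bench"), ("incline bench", "bench"), ("flat bench", "bench"),
      ("deadlift", "deadlift"), ("conventional deadlift", "deadlift"),
      ("sumo deadlift", "deadlift"), ("paused deadlift", "deadlift"),
      ("romanian deadlift", "deadlift"), ("rdl", "deadlift"), ("trap bar deadlift", "deadlift") ] := by
  decide

set_option maxHeartbeats 1000000 in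
-- core: for every normalized name, A's interleaved loop equals B's two-phase lookup
theorem pv_loop_eq (n : String) :
    pvLoopA pvBigThreeAliases n = pvLookupB n := by
  by_cases h1 : n ∈ (["squat", "back squat", "front squat", "pause squat",
      "high bar squat", "low bar squat", "safety bar squat"] : List String)
  · simp only [List.mem_cons, List.not_mem_nil, or_false] at h1
    rcases h1 with rfl | rfl | rfl | rfl | rfl | rfl | rfl <;> decide
  · by_cases h2 : n ∈ (["bench", "bench press", "paused bench", "close grip bench",
        "incline bench", "flat bench"] : List String)
    · simp only [List.mem_cons, List.not_mem_nil, or_false] at h2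
      rcases h2 with rfl | rfl | rfl | rfl | rfl | rfl <;> decide
    · by_cases h3 : n ∈ (["deadlift", "conventional deadlift", "sumo deadlift",
          "paused deadlift", "romanian deadlift", "rdl", "trap bar deadlift"] : List String)
      · simp only [List.mem_cons, List.not_mem_nil, or_false] at h3
        rcases h3 with rfl | rfl | rfl | rfl | rfl | rfl | rfl <;> decide
      · -- n matches no alias: the exact phases of both loops fall through
        simp only [List.mem_cons, List.not_mem_nil, or_false, not_or] at h1 h2 h3
        obtain ⟨e1, e2, e3, e4, e5, e6, e7⟩ := h1
        obtain ⟨f1, f2, f3, f4, f5, f6⟩ := h2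
        obtain ⟨g1, g2, g3, g4, g5, g6, g7⟩ := h3
        unfold pvLookupB
        have hget : pvAliasToBucket.get? n = none := by
          rw [pvAliasToBucket_eq]
          simp [PySem.Dict.get?_mk_cons, beq_iff_eq,
            Ne.symm e1, Ne.symm e2, Ne.symm e3, Ne.symm e4, Ne.symm e5, Ne.symm e6, Ne.symm e7,
            Ne.symm f1, Ne.symm f2, Ne.symm f3, Ne.symm f4, Ne.symm f5, Ne.symm f6,
            Ne.symm g1, Ne.symm g2, Ne.symm g3, Ne.symm g4, Ne.symm g5, Ne.symm g6, Ne.symm g7]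
          rfl
        rw [hget]
        simp [pvLoopA, pvBigThreeAliases, pvSubLoopB, pvBucketsB,
          PySem.Set.mem_ofList,
          e1, e2, e3, e4, e5, e6, e7, f1, f2, f3, f4, f5, f6, g1, g2, g3, g4, g5, g6, g7]

-- ===== VERDICT (by name: the statement is the Claim_ definition above) =====
set_option maxHeartbeats 1000000 in
theorem infer_big_three_bucket_py_spec : Claim_equal_infer_big_three_bucket_py := by
  intro exercise_name movement_category _
  unfold Spec_infer_big_three_bucket_py infer_big_three_bucket_py infer_big_three_bucket_py_alt
  simp only [pvNormName]
  have hof : PySem.Set.ofList ["squat", "bench", "deadlift"] = pvBucketsB := by decide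
  rw [hof, PySem.Set.contains_eq_listContains]
  by_cases hc : pvBucketsB.contains
      (PySem.Str.lower (PySem.Str.strip (movement_category.getD ""))) = true
  · rw [if_pos hc, if_pos hc]
  · rw [if_neg hc, if_neg hc]
    exact pv_loop_eq _
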